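-- pv_equiv track=rewrite | github.com/theaeolianmachine/aoc2024 | day22/day22.py | part_one
-- ===== SOURCE A (Python) =====
-- def calculate_next_secret(secret: int) -> int:
--     new_secret = secret
--
--     # Step 1
--     calc = new_secret * 64
--     new_secret ^= calc
--     new_secret = new_secret % 16777216
--
--     # Step 2
--     calc = new_secret // 32
--     new_secret ^= calc
--     new_secret = new_secret % 16777216
--
--     # Step 3
--     calc = new_secret * 2048
--     new_secret ^= calc
--     new_secret = new_secret % 16777216
--
--     return new_secret
--
-- def part_one(secrets: list[int]):
--     nth_secret: dict[int, int] = {}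
--     for secret in secrets:
--         new_secret = secret
--         for i in range(2000):
--             new_secret = calculate_next_secret(new_secret)
--         nth_secret[secret] = new_secret
--
--     return sum(nth_secret.values())
-- ===== SOURCE B (Python) =====
-- # Same result via linear algebra over GF(2): one PRNG step is a linear map on 24-bit
-- # states, so the 2000-fold step is the 24x24 bit-matrix power M^2000, computed once by
-- # square-and-multiply and then applied to each distinct seed.
--
-- def _step(x):
--     x = (x ^ (x << 6)) % 16777216
--     x = (x ^ (x >> 5)) % 16777216
--     x = (x ^ (x << 11)) % 16777216
--     return x
--
-- def _apply(m, x):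
--     # xor of the columns of m selected by the bits of x
--     out = 0
--     for col in m:
--         if x & 1 == 1:
--             out ^= col
--         x >>= 1
--     return out
--
-- def _compose(m2, m1):
--     # columns of the composite map: apply m2 to each column of m1
--     return [_apply(m2, col) for col in m1]
--
-- def part_one(secrets):
--     m = [_step(1 << i) for i in range(24)]
--     p = [1 << i for i in range(24)]  # identity
--     e = 2000
--     while e != 0:
--         if e & 1 == 1:
--             p = _compose(m, p)
--         m = _compose(m, m)
--         e >>= 1
--     seen = set()
--     total = 0
--     for s in secrets:
--         if s not in seen:
--             seen.add(s)
--             total += _apply(p, s % 16777216)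
--     return total
-- ===== Notes on version B (the rewrite author's own statement) =====
-- stated objective: faster
-- what changed: B replaces the 2000-fold per-seed PRNG iteration by linear algebra over GF(2): one step is a linear map on 24-bit states, so B builds the 24x24 bit-matrix for one step, raises it to the 2000th power once by square-and-multiply, and applies the resulting matrix to each distinct seed (deduplicated with a set instead of A's dict).
import Mathlib
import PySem

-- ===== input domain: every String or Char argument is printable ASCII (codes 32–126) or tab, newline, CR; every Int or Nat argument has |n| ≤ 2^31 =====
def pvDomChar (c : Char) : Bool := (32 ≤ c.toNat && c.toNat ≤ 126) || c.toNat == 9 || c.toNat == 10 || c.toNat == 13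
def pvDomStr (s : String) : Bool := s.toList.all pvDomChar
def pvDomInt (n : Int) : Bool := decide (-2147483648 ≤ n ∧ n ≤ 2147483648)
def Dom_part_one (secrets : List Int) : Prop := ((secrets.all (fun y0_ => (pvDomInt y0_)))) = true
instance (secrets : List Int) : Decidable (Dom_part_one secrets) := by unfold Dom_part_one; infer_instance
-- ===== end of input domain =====

-- B replaces the per-seed 2000-fold PRNG iteration by the 2000th power of the step's
-- GF(2) bit-matrix, computed once by square-and-multiply (objective: faster).

-- ===== PORT A =====
def calculate_next_secret (secret : Int) : Int :=
  let n1 := PySem.Int.mod (PySem.Int.bxor secret (secret * 64)) 16777216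
  let n2 := PySem.Int.mod (PySem.Int.bxor n1 (PySem.Int.floordiv n1 32)) 16777216
  PySem.Int.mod (PySem.Int.bxor n2 (n2 * 2048)) 16777216

def part_one (secrets : List Int) : Int :=
  let nth := secrets.foldl
    (fun (d : PySem.Dict Int Int) secret =>
      d.insert secret
        ((PySem.List.pyRange 0 2000 1).foldl (fun s _ => calculate_next_secret s) secret))
    PySem.Dict.empty
  nth.values.sum

-- ===== PORT B =====
def pvStep (x : Nat) : Nat :=
  let a := (x ^^^ (x <<< 6)) % 16777216
  let b := (a ^^^ (a >>> 5)) % 16777216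
  (b ^^^ (b <<< 11)) % 16777216

def pvApply (m : List Nat) (x : Nat) : Nat :=
  (m.foldl
    (fun (st : Nat × Nat) col =>
      (if st.2 &&& 1 = 1 then st.1 ^^^ col else st.1, st.2 >>> 1))
    (0, x)).1

def pvCompose (m2 m1 : List Nat) : List Nat := m1.map (pvApply m2)

def pvPowLoop (m p : List Nat) (e : Nat) : List Nat :=
  if e = 0 then p
  else pvPowLoop (pvCompose m m) (if e &&& 1 = 1 then pvCompose m p else p) (e >>> 1)
termination_by e
decreasing_by simp only [Nat.shiftRight_eq_div_pow]; omega

def part_one_alt (secrets : List Int) : Int :=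
  let m := (List.range 24).map (fun i => pvStep (1 <<< i))
  let p := pvPowLoop m ((List.range 24).map (fun i => 1 <<< i)) 2000
  (secrets.foldl
    (fun (st : PySem.Set Int × Int) s =>
      if PySem.Set.contains st.1 s then st
      else (PySem.Set.add st.1 s, st.2 + (pvApply p ((PySem.Int.mod s 16777216).toNat) : Int)))
    (PySem.Set.empty, 0)).2

-- ===== PRECONDITION & SPEC =====
def Spec_part_one (secrets : List Int) (out : Int) : Prop := out = part_one_alt secrets
instance (secrets : List Int) (out : Int) : Decidable (Spec_part_one secrets out) := by unfold Spec_part_one; infer_instance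

-- ===== CLAIM (what is proved, stated in full; the proofs are below) =====
def Claim_equal_part_one : Prop := ∀ (secrets : List Int), Dom_part_one secrets → Spec_part_one secrets (part_one secrets)

-- ===== LEMMAS AND PROOFS =====

-- low 24 bits of a Python int (the state the PRNG actually lives on)
def pvLow (a : Int) : Nat := (a % 16777216).toNat

-- A's per-seed inner computations, named for the proofs (definitionally the fold bodies)
def pvF (s : Int) : Int :=
  (PySem.List.pyRange 0 2000 1).foldl (fun s _ => calculate_next_secret s) s

def pvG (s : Int) : Int :=
  (pvApply
    (pvPowLoop ((List.range 24).map fun i => pvStep (1 <<< i))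
      ((List.range 24).map fun i => 1 <<< i) 2000)
    ((PySem.Int.mod s 16777216).toNat) : Int)

-- xor algebra helpers
theorem pvXlc (a b c : Nat) : a ^^^ (b ^^^ c) = b ^^^ (a ^^^ c) := by
  rw [← Nat.xor_assoc, Nat.xor_comm a b, Nat.xor_assoc]

theorem pvXor4 (a b c d : Nat) : (a ^^^ b) ^^^ (c ^^^ d) = (a ^^^ c) ^^^ (b ^^^ d) := by
  rw [Nat.xor_assoc, pvXlc b c d, ← Nat.xor_assoc]

theorem pvTwoMulXor (u v : Nat) : (2*u) ^^^ (2*v) = 2*(u ^^^ v) := by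
  have h : (u ^^^ v) <<< 1 = u <<< 1 ^^^ v <<< 1 := Nat.shiftLeft_xor_distrib
  simpa [Nat.shiftLeft_eq, Nat.mul_comm] using h.symm

theorem pvTwoMulXorOne (u : Nat) : (2*u) ^^^ 1 = 2*u + 1 :=
  Nat.xor_one_of_even ⟨u, by omega⟩

-- (2^n - 1) ^^^ z is the complement of z below 2^n
theorem pvMaskXor : ∀ (n z : Nat), z < 2^n → (2^n - 1) ^^^ z = 2^n - 1 - z := by
  intro n
  induction n with
  | zero => intro z hz; interval_cases z; simp
  | succ n ih =>
    intro z hz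
    have hK : (2:Nat)^(n+1) = 2*2^n := by ring
    have hK1 : (1:Nat) ≤ 2^n := Nat.one_le_two_pow
    have hmask : (2:Nat)^(n+1) - 1 = 2*(2^n - 1) + 1 := by omega
    rcases Nat.mod_two_eq_zero_or_one z with h2 | h2
    · obtain ⟨w, hw⟩ : ∃ w, z = 2*w := ⟨z/2, by omega⟩
      subst hw
      have hw' : w < 2^n := by omega
      calc (2^(n+1)-1) ^^^ (2*w)
          = (2*(2^n-1)+1) ^^^ (2*w) := by rw [hmask]
        _ = (2*(2^n-1) ^^^ 1) ^^^ (2*w) := by rw [pvTwoMulXorOne]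
        _ = (2*(2^n-1) ^^^ 2*w) ^^^ 1 := by
            rw [Nat.xor_assoc, Nat.xor_assoc, Nat.xor_comm 1 (2*w)]
        _ = 2*((2^n-1) ^^^ w) ^^^ 1 := by rw [pvTwoMulXor]
        _ = 2*((2^n-1) ^^^ w) + 1 := pvTwoMulXorOne _
        _ = 2*(2^n-1-w) + 1 := by rw [ih w hw']
        _ = 2^(n+1)-1-(2*w) := by omega
    · obtain ⟨w, hw⟩ : ∃ w, z = 2*w + 1 := ⟨z/2, by omega⟩
      subst hw
      have hw' : w < 2^n := by omega
      calc (2^(n+1)-1) ^^^ (2*w+1)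
          = (2*(2^n-1)+1) ^^^ (2*w+1) := by rw [hmask]
        _ = (2*(2^n-1) ^^^ 1) ^^^ (2*w ^^^ 1) := by rw [pvTwoMulXorOne, pvTwoMulXorOne]
        _ = (2*(2^n-1) ^^^ 2*w) ^^^ (1 ^^^ 1) := pvXor4 _ _ _ _
        _ = 2*((2^n-1) ^^^ w) := by rw [Nat.xor_self, Nat.xor_zero, pvTwoMulXor]
        _ = 2*(2^n-1-w) := by rw [ih w hw']
        _ = 2^(n+1)-1-(2*w+1) := by omega

theorem pvM24 : (16777216:Nat) = 2^24 := by norm_num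

theorem pvCompXorR (x y : Nat) (hx : x < 2^24) (hy : y < 2^24) :
    2^24 - 1 - (x ^^^ y) = x ^^^ (2^24 - 1 - y) := by
  rw [← pvMaskXor 24 y hy, ← pvMaskXor 24 (x ^^^ y) (Nat.xor_lt_two_pow hx hy), pvXlc]

theorem pvCompXorL (x y : Nat) (hx : x < 2^24) (hy : y < 2^24) :
    2^24 - 1 - (x ^^^ y) = (2^24 - 1 - x) ^^^ y := by
  rw [← pvMaskXor 24 x hx, ← pvMaskXor 24 (x ^^^ y) (Nat.xor_lt_two_pow hx hy),
      ← Nat.xor_assoc]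

theorem pvCompXor2 (x y : Nat) (hx : x < 2^24) (hy : y < 2^24) :
    x ^^^ y = (2^24 - 1 - x) ^^^ (2^24 - 1 - y) := by
  rw [← pvMaskXor 24 x hx, ← pvMaskXor 24 y hy, pvXor4, Nat.xor_self, Nat.zero_xor]

-- Python ^ reduced mod 2^24 is the xor of the reduced arguments
theorem pvBxorMod (a b : Int) :
    PySem.Int.bxor a b % 16777216 = ((pvLow a ^^^ pvLow b : Nat) : Int) := by
  have castmod : ∀ n : Nat, ((n:Int)) % 16777216 = ((n % 16777216 : Nat) : Int) := by
    intro n; omega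
  have negmod : ∀ n : Nat, ((-(n:Int) - 1) % 16777216) = ((16777216 - 1 - n % 16777216 : Nat) : Int) := by
    intro n; omega
  have modlt : ∀ n : Nat, n % (2^24 : Nat) < 2^24 := by intro n; omega
  unfold PySem.Int.bxor pvLow
  split_ifs with ha hb hb
  · have h1 : (a % 16777216).toNat = a.toNat % 16777216 := by omega
    have h2 : (b % 16777216).toNat = b.toNat % 16777216 := by omega
    rw [castmod, h1, h2]
    congr 1
    rw [pvM24, Nat.xor_mod_two_pow]
  · have h1 : (a % 16777216).toNat = a.toNat % 16777216 := by omega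
    have h2 : (b % 16777216).toNat = 16777216 - 1 - ((-b - 1).toNat % 16777216) := by omega
    rw [negmod, h1, h2]
    congr 1
    rw [pvM24, Nat.xor_mod_two_pow]
    exact pvCompXorR _ _ (modlt _) (modlt _)
  · have h1 : (a % 16777216).toNat = 16777216 - 1 - ((-a - 1).toNat % 16777216) := by omega
    have h2 : (b % 16777216).toNat = b.toNat % 16777216 := by omega
    rw [negmod, h1, h2]
    congr 1
    rw [pvM24, Nat.xor_mod_two_pow]
    exact pvCompXorL _ _ (modlt _) (modlt _)
  · have h1 : (a % 16777216).toNat = 16777216 - 1 - ((-a - 1).toNat % 16777216) := by omega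
    have h2 : (b % 16777216).toNat = 16777216 - 1 - ((-b - 1).toNat % 16777216) := by omega
    rw [castmod, h1, h2]
    congr 1
    rw [pvM24, Nat.xor_mod_two_pow]
    exact pvCompXor2 _ _ (modlt _) (modlt _)

theorem pvLow_lt (a : Int) : pvLow a < 16777216 := by unfold pvLow; omega

theorem pvLow_mul64 (a : Int) : pvLow (a * 64) = (pvLow a * 64) % 16777216 := by
  unfold pvLow; omega

theorem pvStep_lt (x : Nat) : pvStep x < 16777216 := by
  simp only [pvStep]; omega

theorem pvLow_natCast_small (v : Nat) (h : v < 16777216) : pvLow (v : Int) = v := by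
  unfold pvLow; omega

theorem pvModM (x : Int) : PySem.Int.mod x 16777216 = x % 16777216 :=
  PySem.Int.mod_eq_emod_of_pos (by norm_num)

-- one Python PRNG step equals pvStep on the low 24 bits
theorem pvCalc (a : Int) : calculate_next_secret a = ((pvStep (pvLow a) : Nat) : Int) := by
  have hx : pvLow a < 16777216 := pvLow_lt a
  have s1 : PySem.Int.mod (PySem.Int.bxor a (a * 64)) 16777216
      = (((pvLow a ^^^ (pvLow a <<< 6)) % 16777216 : Nat) : Int) := by
    rw [pvModM, pvBxorMod, pvLow_mul64]
    congr 1
    rw [Nat.shiftLeft_eq]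
    norm_num
    rw [pvM24, Nat.xor_mod_two_pow, Nat.mod_eq_of_lt (show pvLow a < 2^24 by omega)]
  simp only [calculate_next_secret, pvStep]
  rw [s1]
  set a1 : Nat := (pvLow a ^^^ (pvLow a <<< 6)) % 16777216 with ha1
  have ha1lt : a1 < 16777216 := by omega
  have s2 : PySem.Int.mod (PySem.Int.bxor ((a1:Nat):Int) (PySem.Int.floordiv ((a1:Nat):Int) 32)) 16777216
      = (((a1 ^^^ (a1 >>> 5)) % 16777216 : Nat) : Int) := by
    rw [PySem.Int.floordiv_eq_ediv_of_pos (by norm_num)]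
    have hdiv : ((a1:Nat):Int) / 32 = ((a1 / 32 : Nat) : Int) := by omega
    rw [hdiv, PySem.Int.bxor_natCast, pvModM]
    have h5 : a1 / 32 = a1 >>> 5 := by
      rw [Nat.shiftRight_eq_div_pow]
    rw [h5]
    omega
  rw [s2]
  set b1 : Nat := (a1 ^^^ (a1 >>> 5)) % 16777216 with hb1
  have s3 : PySem.Int.mod (PySem.Int.bxor ((b1:Nat):Int) (((b1:Nat):Int) * 2048)) 16777216
      = (((b1 ^^^ (b1 <<< 11)) % 16777216 : Nat) : Int) := by
    have hmul : ((b1:Nat):Int) * 2048 = ((b1 * 2048 : Nat) : Int) := by push_cast; ring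
    rw [hmul, PySem.Int.bxor_natCast, pvModM]
    have h11 : b1 <<< 11 = b1 * 2048 := by rw [Nat.shiftLeft_eq]
    rw [h11]
    omega
  rw [s3]

theorem pvIter : ∀ (n : Nat) (a : Int),
    calculate_next_secret^[n+1] a = ((pvStep^[n+1] (pvLow a) : Nat) : Int) := by
  intro n
  induction n with
  | zero => intro a; simpa using pvCalc a
  | succ n ih =>
    intro a
    rw [Function.iterate_succ_apply' calculate_next_secret (n+1), ih,
        Function.iterate_succ_apply' pvStep (n+1)]
    set v : Nat := pvStep^[n+1] (pvLow a) with hv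
    have hvlt : v < 16777216 := by
      rw [hv, Function.iterate_succ_apply' pvStep n]
      exact pvStep_lt _
    rw [pvCalc, pvLow_natCast_small v hvlt]

theorem pvFoldIter {α β : Type} (f : α → α) :
    ∀ (l : List β) (s : α), l.foldl (fun s _ => f s) s = f^[l.length] s := by
  intro l
  induction l with
  | nil => intro s; simp
  | cons x t ih => intro s; simp [ih, Function.iterate_succ_apply]

-- the column-selection loop, recursively
def pvApplyRec : List Nat → Nat → Nat
  | [], _ => 0
  | c :: m, x => (if x &&& 1 = 1 then c else 0) ^^^ pvApplyRec m (x >>> 1)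

theorem pvApply_eq_rec : ∀ (m : List Nat) (o x : Nat),
    (m.foldl (fun (st : Nat × Nat) col =>
        (if st.2 &&& 1 = 1 then st.1 ^^^ col else st.1, st.2 >>> 1)) (o, x)).1
      = o ^^^ pvApplyRec m x := by
  intro m
  induction m with
  | nil => intro o x; simp [pvApplyRec]
  | cons c m ih =>
    intro o x
    simp only [List.foldl_cons, pvApplyRec]
    by_cases h : x &&& 1 = 1
    · simp only [h, if_true, ih, Nat.xor_assoc]
    · simp only [h, if_false, ih, Nat.zero_xor]

theorem pvApply_rec (m : List Nat) (x : Nat) : pvApply m x = pvApplyRec m x := by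
  unfold pvApply; rw [pvApply_eq_rec, Nat.zero_xor]

theorem pvLin_zero (f : Nat → Nat) (hf : ∀ u v, f (u ^^^ v) = f u ^^^ f v) : f 0 = 0 := by
  have h := hf 0 0
  simp at h
  omega

theorem pvApplyRec_spec : ∀ (n : Nat) (f : Nat → Nat),
    (∀ u v, f (u ^^^ v) = f u ^^^ f v) →
    ∀ x, x < 2^n → pvApplyRec ((List.range n).map fun i => f (1 <<< i)) x = f x := by
  intro n
  induction n with
  | zero =>
    intro f hf x hx
    interval_cases x
    simp [pvApplyRec, pvLin_zero f hf]
  | succ n ih =>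
    intro f hf x hx
    have hmap : ((List.range (n+1)).map fun i => f (1 <<< i))
        = f (1 <<< 0) :: ((List.range n).map fun i => f (1 <<< i <<< 1)) := by
      rw [List.range_succ_eq_map, List.map_cons, List.map_map]
      congr 1
      apply List.map_congr_left
      intro i _
      show f (1 <<< (i+1)) = f (1 <<< i <<< 1)
      rw [Nat.shiftLeft_add]
    have hg : ∀ u v, f ((u ^^^ v) <<< 1) = f (u <<< 1) ^^^ f (v <<< 1) := by
      intro u v
      rw [Nat.shiftLeft_xor_distrib, hf]
    have ihg : ∀ y, y < 2^n →
        pvApplyRec ((List.range n).map fun i => f (1 <<< i <<< 1)) y = f (y <<< 1) := by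
      intro y hy
      have h := ih (fun z => f (z <<< 1)) hg y hy
      simpa using h
    have hx2 : x >>> 1 < 2^n := by
      rw [Nat.shiftRight_eq_div_pow]
      have hK : (2:Nat)^(n+1) = 2*2^n := by ring
      omega
    rw [hmap]
    simp only [pvApplyRec]
    rw [ihg _ hx2]
    have h10 : (1:Nat) <<< 0 = 1 := rfl
    rw [h10]
    have e1 : x >>> 1 = x / 2 := by rw [Nat.shiftRight_eq_div_pow]
    rw [show (x >>> 1) <<< 1 = 2 * (x / 2) by rw [e1, Nat.shiftLeft_eq]; ring]
    rw [Nat.and_one_is_mod]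
    by_cases h : x % 2 = 1
    · rw [if_pos h, ← hf]
      congr 1
      rw [Nat.xor_comm, pvTwoMulXorOne]
      omega
    · rw [if_neg h, Nat.zero_xor]
      congr 1
      omega

-- M represents the linear map f on 24-bit states
def pvRep (M : List Nat) (f : Nat → Nat) : Prop :=
  (∀ u v, f (u ^^^ v) = f u ^^^ f v) ∧
  (∀ u, u < 16777216 → f u < 16777216) ∧
  M = (List.range 24).map fun i => f (1 <<< i)

theorem pvRep_eval (M : List Nat) (f : Nat → Nat) (h : pvRep M f)
    (x : Nat) (hx : x < 16777216) : pvApply M x = f x := by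
  rw [pvApply_rec, h.2.2]
  exact pvApplyRec_spec 24 f h.1 x (by omega)

theorem pvRep_congr (M : List Nat) (f g : Nat → Nat) (h : pvRep M f)
    (hfg : ∀ x, f x = g x) : pvRep M g := by
  have hh : f = g := funext hfg
  rwa [hh] at h

theorem pvRep_compose (M2 M1 : List Nat) (f g : Nat → Nat)
    (h2 : pvRep M2 f) (h1 : pvRep M1 g) : pvRep (pvCompose M2 M1) (fun x => f (g x)) := by
  refine ⟨?_, ?_, ?_⟩
  · intro u v
    show f (g (u ^^^ v)) = f (g u) ^^^ f (g v)
    rw [h1.1, h2.1]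
  · intro u hu
    show f (g u) < 16777216
    exact h2.2.1 _ (h1.2.1 _ hu)
  · unfold pvCompose
    rw [h1.2.2, List.map_map]
    apply List.map_congr_left
    intro i hi
    show pvApply M2 (g (1 <<< i)) = f (g (1 <<< i))
    apply pvRep_eval M2 f h2
    apply h1.2.1
    have hi24 : i < 24 := List.mem_range.mp hi
    rw [Nat.one_shiftLeft]
    calc (2:Nat)^i < 2^24 := Nat.pow_lt_pow_right (by omega) hi24
      _ = 16777216 := by norm_num

theorem pvRep_id : pvRep ((List.range 24).map fun i => 1 <<< i) (fun x => x) :=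
  ⟨fun _ _ => rfl, fun _ h => h, rfl⟩

theorem pvStage_lin_left (k : Nat) (u v : Nat) :
    ((u ^^^ v) ^^^ ((u ^^^ v) <<< k)) % 16777216
      = ((u ^^^ u <<< k) % 16777216) ^^^ ((v ^^^ v <<< k) % 16777216) := by
  rw [Nat.shiftLeft_xor_distrib, pvXor4, pvM24, Nat.xor_mod_two_pow]

theorem pvStage_lin_right (k : Nat) (u v : Nat) :
    ((u ^^^ v) ^^^ ((u ^^^ v) >>> k)) % 16777216
      = ((u ^^^ u >>> k) % 16777216) ^^^ ((v ^^^ v >>> k) % 16777216) := by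
  rw [Nat.shiftRight_xor_distrib, pvXor4, pvM24, Nat.xor_mod_two_pow]

theorem pvStep_lin (u v : Nat) : pvStep (u ^^^ v) = pvStep u ^^^ pvStep v := by
  simp only [pvStep]
  rw [pvStage_lin_left 6, pvStage_lin_right 5, pvStage_lin_left 11]

theorem pvRep_step : pvRep ((List.range 24).map fun i => pvStep (1 <<< i)) pvStep :=
  ⟨pvStep_lin, fun u _ => pvStep_lt u, rfl⟩

theorem pvIterTwo (f : Nat → Nat) (h : Nat) (y : Nat) :
    (fun x => f (f x))^[h] y = f^[2*h] y := by
  have h2 : (fun x => f (f x)) = f^[2] := by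
    funext z
    simp [Function.iterate_succ_apply]
  rw [h2, ← Function.iterate_mul]

theorem pvPowLoop_rep : ∀ (e : Nat) (M P : List Nat) (f g : Nat → Nat),
    pvRep M f → pvRep P g → pvRep (pvPowLoop M P e) (fun x => f^[e] (g x)) := by
  intro e
  induction e using Nat.strong_induction_on with
  | _ e ih =>
    intro M P f g hM hP
    rw [pvPowLoop]
    by_cases he : e = 0
    · simp only [he, if_true]
      exact pvRep_congr P g _ hP (fun x => by simp)
    · simp only [he, if_false]
      have hdiv : e >>> 1 = e / 2 := by
        rw [Nat.shiftRight_eq_div_pow]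
      have hlt : e >>> 1 < e := by omega
      have hbit : e &&& 1 = e % 2 := Nat.and_one_is_mod e
      have hMM : pvRep (pvCompose M M) (fun x => f (f x)) := pvRep_compose M M f f hM hM
      by_cases hodd : e &&& 1 = 1
      · simp only [hodd, if_true]
        have hP' : pvRep (pvCompose M P) (fun x => f (g x)) := pvRep_compose M P f g hM hP
        have hrec := ih _ hlt _ _ _ _ hMM hP'
        apply pvRep_congr _ _ _ hrec
        intro x
        show (fun x => f (f x))^[e >>> 1] (f (g x)) = f^[e] (g x)
        rw [pvIterTwo, ← Function.iterate_succ_apply]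
        have he2 : (2 * (e >>> 1)).succ = e := by omega
        rw [he2]
      · simp only [hodd, if_false]
        have hrec := ih _ hlt _ _ _ _ hMM hP
        apply pvRep_congr _ _ _ hrec
        intro x
        show (fun x => f (f x))^[e >>> 1] (g x) = f^[e] (g x)
        rw [pvIterTwo]
        have he2 : 2 * (e >>> 1) = e := by omega
        rw [he2]

-- A's dict loop: lookup after the fold
theorem pvGetD_fold : ∀ (l : List Int) (d : PySem.Dict Int Int) (k : Int),
    (l.foldl (fun d s => d.insert s (pvF s)) d).getD k 0
      = if k ∈ l then pvF k else d.getD k 0 := by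
  intro l
  induction l with
  | nil => intro d k; simp
  | cons x t ih =>
    intro d k
    rw [List.foldl_cons, ih]
    by_cases hk : k ∈ t
    · simp [hk]
    · simp only [hk, if_false, List.mem_cons]
      rw [PySem.Dict.getD_insert]
      by_cases hx : k = x
      · simp [hx]
      · simp [hx]

-- B's set loop only ever appends fresh elements
theorem pvUpdate_prefix : ∀ (l : List Int) (s : PySem.Set Int),
    ∃ r, PySem.Set.update s l = s ++ r := by
  intro l
  induction l with
  | nil => intro s; exact ⟨[], by simp [PySem.Set.update_nil]⟩
  | cons x t ih =>
    intro s
    rw [PySem.Set.update_cons]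
    by_cases h : x ∈ s
    · have hadd : PySem.Set.add s x = s := by
        simp [PySem.Set.add, h]
      rw [hadd]
      exact ih s
    · have hadd : PySem.Set.add s x = s ++ [x] := by
        simp [PySem.Set.add, h]
      obtain ⟨r, hr⟩ := ih (s ++ [x])
      exact ⟨[x] ++ r, by rw [hadd, hr, List.append_assoc]⟩

theorem pvBFold : ∀ (l : List Int) (seen : PySem.Set Int) (t : Int),
    (l.foldl (fun (st : PySem.Set Int × Int) s =>
        if PySem.Set.contains st.1 s then st
        else (PySem.Set.add st.1 s, st.2 + pvG s)) (seen, t)).2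
      = t + (((PySem.Set.update seen l).drop seen.length).map pvG).sum := by
  intro l
  induction l with
  | nil =>
    intro seen t
    simp [PySem.Set.update_nil]
  | cons x l ih =>
    intro seen t
    rw [List.foldl_cons, PySem.Set.update_cons]
    by_cases h : x ∈ seen
    · have hc : PySem.Set.contains seen x = true := (PySem.Set.contains_iff seen x).mpr h
      have hadd : PySem.Set.add seen x = seen := by
        simp [PySem.Set.add, h]
      simp only [hc, if_true]
      rw [ih, hadd]
    · have hc : PySem.Set.contains seen x = false := by
        rw [← Bool.not_eq_true, PySem.Set.contains_iff]; exact h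
      have hadd : PySem.Set.add seen x = seen ++ [x] := by
        simp [PySem.Set.add, h]
      simp only [hc, Bool.false_eq_true, if_false]
      rw [ih, hadd]
      obtain ⟨r, hr⟩ := pvUpdate_prefix l (seen ++ [x])
      rw [hr]
      have hlen2 : (seen ++ [x]).length = seen.length + 1 := by simp
      have h1 : (seen ++ [x] ++ r).drop seen.length = [x] ++ r := by
        rw [List.append_assoc]
        exact List.drop_left
      have h2 : (seen ++ [x] ++ r).drop (seen.length + 1) = r := by
        have hd : ((seen ++ [x]) ++ r).drop ((seen ++ [x]).length) = r := List.drop_left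
        rwa [hlen2] at hd
      rw [h1, hlen2, h2]
      simp only [List.map_append, List.map_cons, List.map_nil, List.sum_append,
        List.sum_cons, List.sum_nil]
      ring

-- per-seed agreement: A's 2000 iterations equal B's matrix application
theorem pvSeed (s : Int) : pvF s = pvG s := by
  unfold pvF pvG
  rw [pvFoldIter]
  have hlen : (PySem.List.pyRange 0 2000 1).length = 2000 := by
    rw [PySem.List.length_pyRange_one]; decide
  rw [hlen]
  have hrep := pvPowLoop_rep 2000 _ _ _ _ pvRep_step pvRep_id
  have hxeq : (PySem.Int.mod s 16777216).toNat = pvLow s := by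
    rw [pvModM]; rfl
  rw [hxeq, pvRep_eval _ _ hrep _ (pvLow_lt s)]
  show calculate_next_secret^[2000] s = ((pvStep^[2000] (pvLow s) : Nat) : Int)
  have h := pvIter 1999 s
  have e : 1999 + 1 = 2000 := by norm_num
  rw [e] at h
  exact h

-- main equivalence
theorem pvMain (secrets : List Int) : part_one secrets = part_one_alt secrets := by
  have hsA : part_one secrets
      = (secrets.foldl (fun (d : PySem.Dict Int Int) s => d.insert s (pvF s))
          PySem.Dict.empty).values.sum := rfl
  have hsB : part_one_alt secrets
      = (secrets.foldl (fun (st : PySem.Set Int × Int) s =>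
          if PySem.Set.contains st.1 s then st
          else (PySem.Set.add st.1 s, st.2 + pvG s)) (PySem.Set.empty, 0)).2 := rfl
  rw [hsA, hsB]
  have hnodup : (secrets.foldl (fun (d : PySem.Dict Int Int) s => d.insert s (pvF s))
      PySem.Dict.empty).keys.Nodup := by
    apply PySem.Dict.nodup_keys_foldl_insert
    exact PySem.Dict.nodup_keys_empty
  have hkeys : (secrets.foldl (fun (d : PySem.Dict Int Int) s => d.insert s (pvF s))
      PySem.Dict.empty).keys = PySem.Set.ofList secrets := by
    rw [PySem.Dict.keys_foldl_insert secrets (fun _ s => pvF s) PySem.Dict.empty]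
    rw [PySem.Dict.keys_empty, PySem.Set.ofList_eq_foldl]
    rfl
  have hA : (secrets.foldl (fun (d : PySem.Dict Int Int) s => d.insert s (pvF s))
      PySem.Dict.empty).values
      = (PySem.Set.ofList secrets).map (fun k => if k ∈ secrets then pvF k else 0) := by
    rw [PySem.Dict.values_eq_map_keys _ hnodup 0, hkeys]
    apply List.map_congr_left
    intro k hk'
    have hkm : k ∈ secrets := (PySem.Set.mem_ofList secrets k).mp hk'
    rw [pvGetD_fold secrets PySem.Dict.empty k]
    simp [hkm]
  rw [hA, pvBFold secrets PySem.Set.empty 0]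
  have hempty : (PySem.Set.empty : PySem.Set Int) = ([] : List Int) := rfl
  rw [hempty]
  simp only [List.length_nil, List.drop_zero, zero_add]
  have hupd : PySem.Set.update ([] : PySem.Set Int) secrets = PySem.Set.ofList secrets := by
    rw [PySem.Set.ofList_eq_foldl]
    rfl
  rw [hupd]
  congr 1
  apply List.map_congr_left
  intro k hk
  have hkmem : k ∈ secrets := (PySem.Set.mem_ofList secrets k).mp hk
  simp only [hkmem, if_true]
  exact pvSeed k

-- ===== VERDICT (by name: the statement is the Claim_ definition above) =====
theorem part_one_spec : Claim_equal_part_one := by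
  intro secrets _
  unfold Spec_part_one
  exact pvMain secrets
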